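-- pv_equiv track=rewrite | github.com/spuhaha18/DMS | backend/app/auth/ldap.py | derive_role
-- ===== SOURCE A (Python) =====
-- def derive_role(groups: list[str]) -> str:
--     for g in groups:
--         if "DMS-Admin" in g:
--             return "Admin"
--     for g in groups:
--         if "DMS-Approver" in g:
--             return "Approver"
--     for g in groups:
--         if "DMS-Reviewer" in g:
--             return "Reviewer"
--     return "Author"
-- ===== SOURCE B (Python) =====
-- def derive_role(groups: list[str]) -> str:
--     found_approver = False
--     found_reviewer = False
--     for g in groups:
--         if "DMS-Admin" in g:
--             return "Admin"
--         if "DMS-Approver" in g: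
--             found_approver = True
--         if "DMS-Reviewer" in g:
--             found_reviewer = True
--     if found_approver:
--         return "Approver"
--     if found_reviewer:
--         return "Reviewer"
--     return "Author"
-- ===== Notes on version B (the rewrite author's own statement) =====
-- stated objective: simpler
-- what changed: Replaces A's three sequential priority scans over groups with one stateful pass that returns 'Admin' immediately and records approver/reviewer flags, deciding the role after the loop.
import Mathlib
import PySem

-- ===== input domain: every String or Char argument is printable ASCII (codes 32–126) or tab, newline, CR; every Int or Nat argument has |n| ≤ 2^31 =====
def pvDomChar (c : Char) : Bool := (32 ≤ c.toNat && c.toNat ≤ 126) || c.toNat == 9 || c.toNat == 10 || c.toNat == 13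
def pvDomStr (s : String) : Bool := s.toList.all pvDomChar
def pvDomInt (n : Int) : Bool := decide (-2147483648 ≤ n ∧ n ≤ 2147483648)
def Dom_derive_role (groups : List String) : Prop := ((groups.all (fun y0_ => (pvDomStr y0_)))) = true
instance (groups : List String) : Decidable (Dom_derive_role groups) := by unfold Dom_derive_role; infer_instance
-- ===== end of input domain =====

-- B replaces A's three sequential priority scans with one stateful pass (flags); objective: simpler.

-- ===== PORT A =====
-- first for-loop: return "Admin" on a match
def drLoop1 : List String → Option String
  | [] => none
  | g :: gs => if PySem.Str.isIn "DMS-Admin" g then some "Admin" else drLoop1 gs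

-- second for-loop
def drLoop2 : List String → Option String
  | [] => none
  | g :: gs => if PySem.Str.isIn "DMS-Approver" g then some "Approver" else drLoop2 gs

-- third for-loop
def drLoop3 : List String → Option String
  | [] => none
  | g :: gs => if PySem.Str.isIn "DMS-Reviewer" g then some "Reviewer" else drLoop3 gs

def derive_role (groups : List String) : String :=
  match drLoop1 groups with
  | some r => r
  | none =>
    match drLoop2 groups with
    | some r => r
    | none =>
      match drLoop3 groups with
      | some r => r
      | none => "Author"

-- ===== PORT B =====
-- single pass carrying the two flags; early return on "DMS-Admin"
def drAltLoop : List String → Bool → Bool → String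
  | [], fa, fr => if fa then "Approver" else if fr then "Reviewer" else "Author"
  | g :: gs, fa, fr =>
    if PySem.Str.isIn "DMS-Admin" g then "Admin"
    else drAltLoop gs (fa || PySem.Str.isIn "DMS-Approver" g) (fr || PySem.Str.isIn "DMS-Reviewer" g)

def derive_role_alt (groups : List String) : String :=
  drAltLoop groups false false

-- ===== PRECONDITION & SPEC =====
def Spec_derive_role (groups : List String) (out : String) : Prop := out = derive_role_alt groups
instance (groups : List String) (out : String) : Decidable (Spec_derive_role groups out) := by unfold Spec_derive_role; infer_instance

-- ===== CLAIM (what is proved, stated in full; the proofs are below) =====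
def Claim_equal_derive_role : Prop := ∀ (groups : List String), Dom_derive_role groups → Spec_derive_role groups (derive_role groups)

-- ===== LEMMAS AND PROOFS =====

theorem pvIfOrOpt (b c : Bool) (r : String) :
    (if b = true then some r else if c = true then some r else none) =
      (if (b || c) = true then some r else none) := by
  cases b <;> simp

theorem pvAltStep (a p r anyA anyP anyR fa fr : Bool) :
    (if a = true then "Admin"
      else
        if anyA = true then "Admin"
        else if ((fa || p) || anyP) = true then "Approver"
        else if ((fr || r) || anyR) = true then "Reviewer"
        else "Author")
    = (if (a || anyA) = true then "Admin"
        else if (fa || (p || anyP)) = true then "Approver"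
        else if (fr || (r || anyR)) = true then "Reviewer"
        else "Author") := by
  cases a <;> cases fa <;> cases fr <;> cases p <;> simp [Bool.or_assoc]

theorem drLoop1_eq (gs : List String) :
    drLoop1 gs = if gs.any (fun g => PySem.Str.isIn "DMS-Admin" g) then some "Admin" else none := by
  induction gs with
  | nil => simp [drLoop1]
  | cons g gs ih => simp only [drLoop1, List.any_cons, ih, pvIfOrOpt]; rfl

theorem drLoop2_eq (gs : List String) :
    drLoop2 gs = if gs.any (fun g => PySem.Str.isIn "DMS-Approver" g) then some "Approver" else none := by
  induction gs with
  | nil => simp [drLoop2]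
  | cons g gs ih => simp only [drLoop2, List.any_cons, ih, pvIfOrOpt]; rfl

theorem drLoop3_eq (gs : List String) :
    drLoop3 gs = if gs.any (fun g => PySem.Str.isIn "DMS-Reviewer" g) then some "Reviewer" else none := by
  induction gs with
  | nil => simp [drLoop3]
  | cons g gs ih => simp only [drLoop3, List.any_cons, ih, pvIfOrOpt]; rfl

theorem drAltLoop_eq (gs : List String) (fa fr : Bool) :
    drAltLoop gs fa fr =
      if gs.any (fun g => PySem.Str.isIn "DMS-Admin" g) then "Admin"
      else if fa || gs.any (fun g => PySem.Str.isIn "DMS-Approver" g) then "Approver"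
      else if fr || gs.any (fun g => PySem.Str.isIn "DMS-Reviewer" g) then "Reviewer"
      else "Author" := by
  induction gs generalizing fa fr with
  | nil => simp [drAltLoop]
  | cons g gs ih =>
    simp only [drAltLoop, List.any_cons, ih, pvAltStep]; rfl

-- ===== VERDICT (by name: the statement is the Claim_ definition above) =====
theorem derive_role_spec : Claim_equal_derive_role := by
  intro groups _
  show derive_role groups = derive_role_alt groups
  simp only [derive_role, derive_role_alt, drLoop1_eq, drLoop2_eq, drLoop3_eq, drAltLoop_eq,
    Bool.false_or]
  split_ifs <;> simp_all
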